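-- pv_equiv track=rewrite | github.com/pdxgx/neoepiscope | vcfFileParserV2.py | make_mute_strand
-- ===== SOURCE A (Python) =====
-- def make_mute_strand(orig_strand, mute_locs):
--     mute_strand = ""
--     for ind in range(len(orig_strand)):
--         if ind in mute_locs:
--             mute_strand += mute_locs[ind]
--         else:
--             mute_strand += orig_strand[ind]
--     return mute_strand
-- ===== SOURCE B (Python) =====
-- def make_mute_strand(orig_strand, mute_locs):
--     chars = list(orig_strand)
--     for ind, val in mute_locs.items():
--         if 0 <= ind < len(chars):
--             chars[ind] = val
--     return ''.join(chars)
-- ===== Notes on version B (the rewrite author's own statement) =====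
-- stated objective: alternative
-- what changed: Instead of scanning every string index and probing the dict, B copies the string into a mutable list of characters, iterates over the dict's items applying in-range substitutions in place, and joins the result.
import Mathlib
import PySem

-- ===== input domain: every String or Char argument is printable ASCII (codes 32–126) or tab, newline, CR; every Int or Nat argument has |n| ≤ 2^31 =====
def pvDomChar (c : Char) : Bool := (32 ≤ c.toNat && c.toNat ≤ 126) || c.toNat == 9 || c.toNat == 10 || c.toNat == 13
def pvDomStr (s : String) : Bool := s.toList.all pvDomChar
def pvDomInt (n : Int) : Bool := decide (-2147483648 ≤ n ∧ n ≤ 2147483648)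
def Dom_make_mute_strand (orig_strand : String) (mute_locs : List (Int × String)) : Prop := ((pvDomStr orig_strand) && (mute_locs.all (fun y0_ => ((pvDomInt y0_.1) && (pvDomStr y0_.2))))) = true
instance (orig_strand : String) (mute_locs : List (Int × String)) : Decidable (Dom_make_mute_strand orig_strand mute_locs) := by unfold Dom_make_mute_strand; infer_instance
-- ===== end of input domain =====

-- B builds a mutable list of the string's characters and applies the sparse edits by
-- iterating over the dict's items (in-range keys only), instead of A's scan over every
-- index probing the dict; objective: alternative decomposition (same result, same cost class).

-- ===== PORT A =====
-- A: scan every index of orig_strand; if the index is a dict key, append the dict value,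
-- else append the original character (in-range index, so getD's default is never used).
def make_mute_strand (orig_strand : String) (mute_locs : List (Int × String)) : String :=
  let cs := orig_strand.toList
  let d := PySem.Dict.ofList mute_locs
  let res := (List.range cs.length).foldl (fun acc (ind : Nat) =>
      if d.contains (ind : Int) then acc ++ (d.getD (ind : Int) "").toList
      else acc ++ [cs.getD ind ' ']) []
  String.mk res

-- ===== PORT B =====
-- B: chars = list(orig_strand); for (ind, val) in dict items: chars[ind] = val when in range;
-- ''.join(chars). (chars holds strings in Python, hence List (List Char) here.)
def make_mute_strand_alt (orig_strand : String) (mute_locs : List (Int × String)) : String :=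
  let d := PySem.Dict.ofList mute_locs
  let chars := d.items.foldl (fun arr p =>
      if 0 ≤ p.1 ∧ p.1 < (arr.length : Int) then arr.set p.1.toNat p.2.toList else arr)
    (orig_strand.toList.map (fun c => [c]))
  String.mk chars.flatten

-- ===== PRECONDITION & SPEC =====
def Spec_make_mute_strand (orig_strand : String) (mute_locs : List (Int × String)) (out : String) : Prop := out = make_mute_strand_alt orig_strand mute_locs
instance (orig_strand : String) (mute_locs : List (Int × String)) (out : String) : Decidable (Spec_make_mute_strand orig_strand mute_locs out) := by unfold Spec_make_mute_strand; infer_instance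

-- ===== CLAIM (what is proved, stated in full; the proofs are below) =====
def Claim_equal_make_mute_strand : Prop := ∀ (orig_strand : String) (mute_locs : List (Int × String)), Dom_make_mute_strand orig_strand mute_locs → Spec_make_mute_strand orig_strand mute_locs (make_mute_strand orig_strand mute_locs)

-- ===== LEMMAS AND PROOFS =====

-- B's update step, abbreviated for the lemmas.
def pvUpd (arr : List (List Char)) (p : Int × String) : List (List Char) :=
  if 0 ≤ p.1 ∧ p.1 < (arr.length : Int) then arr.set p.1.toNat p.2.toList else arr

theorem pvUpd_length (arr : List (List Char)) (p : Int × String) :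
    (pvUpd arr p).length = arr.length := by
  unfold pvUpd; split <;> simp

theorem pvFold_length (l : List (Int × String)) (arr : List (List Char)) :
    (l.foldl pvUpd arr).length = arr.length := by
  induction l generalizing arr with
  | nil => rfl
  | cons p t ih => simp [List.foldl_cons, ih, pvUpd_length]

-- If index i's key never occurs in l, the fold leaves slot i unchanged.
theorem pvFold_getElem?_of_not_mem (l : List (Int × String)) (arr : List (List Char))
    (i : Nat) (h : (i : Int) ∉ l.map Prod.fst) :
    (l.foldl pvUpd arr)[i]? = arr[i]? := by
  induction l generalizing arr with
  | nil => rfl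
  | cons p t ih =>
    simp only [List.map_cons, List.mem_cons] at h
    push_neg at h
    rw [List.foldl_cons, ih _ h.2]
    unfold pvUpd
    split
    · next hc =>
      rw [List.getElem?_set_ne]
      omega
    · rfl

-- Slot i of the fold: the (unique-keyed) pair with key i wins, otherwise untouched.
theorem pvFold_getElem?_of_mem (l : List (Int × String)) (arr : List (List Char))
    (i : Nat) (hi : i < arr.length) (v : String)
    (hnd : (l.map Prod.fst).Nodup) (hmem : ((i : Int), v) ∈ l) :
    (l.foldl pvUpd arr)[i]? = some v.toList := by
  induction l generalizing arr with
  | nil => cases hmem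
  | cons p t ih =>
    simp only [List.map_cons, List.nodup_cons] at hnd
    rw [List.foldl_cons]
    rcases List.mem_cons.1 hmem with h | h
    · -- p is the pair for index i; i's key does not occur in t
      have hkey : (i : Int) ∉ t.map Prod.fst := by
        rw [← h] at hnd; exact hnd.1
      rw [pvFold_getElem?_of_not_mem t _ i hkey]
      unfold pvUpd
      rw [← h]
      simp only []
      rw [if_pos (by exact ⟨Int.natCast_nonneg i, by exact_mod_cast hi⟩)]
      rw [Int.toNat_natCast]
      rw [List.getElem?_set_self (by simpa using hi)]
    · -- the pair for i is in t
      have hne : p.1 ≠ (i : Int) := by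
        intro he
        exact hnd.1 (he ▸ List.mem_map_of_mem (f := Prod.fst) h)
      exact ih (pvUpd arr p) (by rw [pvUpd_length]; exact hi) hnd.2 h

-- Characterise slot i of B's edited array through the dict's lookup.
theorem pvSlot (orig_strand : String) (mute_locs : List (Int × String)) (i : Nat)
    (hi : i < orig_strand.toList.length) :
    ((PySem.Dict.ofList mute_locs).items.foldl pvUpd
        (orig_strand.toList.map (fun c => [c])))[i]? =
      some (if (PySem.Dict.ofList mute_locs).contains (i : Int) then
              ((PySem.Dict.ofList mute_locs).getD (i : Int) "").toList
            else [orig_strand.toList.getD i ' ']) := by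
  set d := PySem.Dict.ofList mute_locs with hd
  have hnd : d.keys.Nodup := PySem.Dict.nodup_keys_ofList mute_locs
  by_cases hc : d.contains (i : Int) = true
  · obtain ⟨v, hv⟩ : ∃ v, d.get? (i : Int) = some v := by
      rcases ho : d.get? (i : Int) with _ | v
      · rw [PySem.Dict.contains_eq_isSome_get?, ho] at hc; simp at hc
      · exact ⟨v, rfl⟩
    have hmem : ((i : Int), v) ∈ d.items := PySem.Dict.mem_items_of_get?_eq_some d hv
    rw [pvFold_getElem?_of_mem d.items _ i (by simpa using hi) v hnd hmem]
    rw [if_pos hc, PySem.Dict.getD_eq_get?_getD, hv]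
    rfl
  · have hk : (i : Int) ∉ d.items.map Prod.fst := by
      intro hmk
      have : d.contains (i : Int) = true := by
        rw [PySem.Dict.contains_iff_mem_keys]
        simpa [PySem.Dict.keys] using hmk
      exact hc this
    rw [pvFold_getElem?_of_not_mem _ _ _ hk, if_neg hc]
    rw [List.getElem?_map, List.getElem?_eq_getElem hi]
    simp [List.getD, List.getElem?_eq_getElem hi]

theorem pvMain (orig_strand : String) (mute_locs : List (Int × String)) :
    make_mute_strand orig_strand mute_locs = make_mute_strand_alt orig_strand mute_locs := by
  unfold make_mute_strand make_mute_strand_alt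
  set cs := orig_strand.toList with hcs
  set d := PySem.Dict.ofList mute_locs with hd
  -- A's loop is a flatMap over the index range
  have hA : (List.range cs.length).foldl (fun acc (ind : Nat) =>
      if d.contains (ind : Int) then acc ++ (d.getD (ind : Int) "").toList
      else acc ++ [cs.getD ind ' ']) [] =
      (List.range cs.length).flatMap (fun (ind : Nat) =>
        if d.contains (ind : Int) then (d.getD (ind : Int) "").toList
        else [cs.getD ind ' ']) := by
    have hfun : (fun (acc : List Char) (ind : Nat) =>
        if d.contains (ind : Int) then acc ++ (d.getD (ind : Int) "").toList
        else acc ++ [cs.getD ind ' ']) = (fun acc (ind : Nat) => acc ++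
          (if d.contains (ind : Int) then (d.getD (ind : Int) "").toList
           else [cs.getD ind ' '])) := by
      funext acc ind; split <;> rfl
    rw [hfun, PySem.List.foldl_append_eq_flatMap, List.nil_append]
  -- B's edited array is the map of A's per-index pieces over the range
  have hB : d.items.foldl pvUpd (cs.map (fun c => [c])) =
      (List.range cs.length).map (fun (ind : Nat) =>
        if d.contains (ind : Int) then (d.getD (ind : Int) "").toList
        else [cs.getD ind ' ']) := by
    apply List.ext_getElem?
    intro i
    by_cases hi : i < cs.length
    · rw [pvSlot orig_strand mute_locs i (by simpa [hcs] using hi)]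
      rw [List.getElem?_map, List.getElem?_range hi]
      rfl
    · have h1 : (d.items.foldl pvUpd (cs.map (fun c => [c])))[i]? = none := by
        rw [List.getElem?_eq_none]
        rw [pvFold_length]; simpa using Nat.le_of_not_lt hi
      have h2 : ((List.range cs.length).map (fun (ind : Nat) =>
          if d.contains (ind : Int) then (d.getD (ind : Int) "").toList
          else [cs.getD ind ' ']))[i]? = none := by
        rw [List.getElem?_eq_none]
        simpa using Nat.le_of_not_lt hi
      rw [h1, h2]
  simp only []
  rw [hA]
  have hpv : (fun (arr : List (List Char)) (p : Int × String) =>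
      if 0 ≤ p.1 ∧ p.1 < (arr.length : Int) then arr.set p.1.toNat p.2.toList else arr)
      = pvUpd := rfl
  rw [hpv, hB, ← List.flatMap_def]

-- ===== VERDICT (by name: the statement is the Claim_ definition above) =====
theorem make_mute_strand_spec : Claim_equal_make_mute_strand := by
  intro orig_strand mute_locs _
  unfold Spec_make_mute_strand
  exact pvMain orig_strand mute_locs
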